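-- pv_equiv track=rewrite | github.com/balasrinivasanammu/Mallareddy-IT | hackerrank-absoluteelementsum-search.py | playingWithNumbers
-- ===== SOURCE A (Python) =====
-- def playingWithNumbers(arr, queries):
--     result = []
--     shift = 0
--
--     # Iterate through each query
--     for query in queries:
--         shift += query
--         abs_sum = sum(abs(x + shift) for x in arr)
--         result.append(abs_sum)
--     return result
-- ===== SOURCE B (Python) =====
-- def playingWithNumbers(arr, queries):
--     # Sort once, precompute prefix sums, then answer each query with a
--     # binary search for the sign split point: O((n+q) log n) instead of O(n*q).
--     s = sorted(arr)
--     n = len(s)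
--     prefix = [0]
--     for x in s:
--         prefix.append(prefix[-1] + x)
--     total = prefix[n]
--     result = []
--     shift = 0
--     for q in queries:
--         shift += q
--         # k = number of elements of s that are < -shift  (bisect_left by hand;
--         # A imports nothing, so no bisect module here)
--         lo, hi = 0, n
--         while lo < hi:
--             mid = (lo + hi) // 2
--             if s[mid] < -shift:
--                 lo = mid + 1
--             else:
--                 hi = mid
--         k = lo
--         neg = prefix[k]
--         result.append((total - neg + (n - k) * shift) - (neg + k * shift))
--     return result
-- ===== Notes on version B (the rewrite author's own statement) =====
-- stated objective: faster
-- what changed: Instead of rescanning the whole array for every query, B sorts the array once, precomputes prefix sums, and answers each query by binary-searching the index where arr[i]+shift changes sign, combining the two halves in O(1).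
import Mathlib
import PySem

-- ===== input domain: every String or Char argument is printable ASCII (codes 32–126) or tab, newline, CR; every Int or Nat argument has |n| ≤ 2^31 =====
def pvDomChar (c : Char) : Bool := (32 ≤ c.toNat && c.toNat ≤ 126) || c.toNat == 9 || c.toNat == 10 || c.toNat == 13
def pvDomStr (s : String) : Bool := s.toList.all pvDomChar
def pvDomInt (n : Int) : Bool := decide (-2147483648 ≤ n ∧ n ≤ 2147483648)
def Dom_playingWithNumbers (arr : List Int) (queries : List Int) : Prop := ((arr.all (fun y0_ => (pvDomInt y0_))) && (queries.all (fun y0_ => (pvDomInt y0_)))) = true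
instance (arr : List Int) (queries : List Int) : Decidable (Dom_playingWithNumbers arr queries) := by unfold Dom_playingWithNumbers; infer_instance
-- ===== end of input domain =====

-- B replaces A's per-query scan of the whole array by sort + pre sums + a
-- binary search for the sign split point per query (objective: faster).

-- ===== PORT A =====
-- running shift, append sum of |x+shift| over arr for each query
def playingWithNumbers (arr : List Int) (queries : List Int) : List Int :=
  (queries.foldl
    (fun (st : List Int × Int) query =>
      let shift := st.2 + query
      let abs_sum := (arr.map (fun x => |x + shift|)).sum
      (st.1 ++ [abs_sum], shift))
    ([], 0)).1

-- ===== PORT B =====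
-- the Python loop `pre.append(pre[-1] + x)` building running sums
def pvPrefixAux (acc : Int) : List Int → List Int
  | [] => []
  | x :: xs => (acc + x) :: pvPrefixAux (acc + x) xs

def playingWithNumbers_alt (arr : List Int) (queries : List Int) : List Int :=
  let s := PySem.List.sorted arr (fun x => x) false
  let n := s.length
  let pre := (0 : Int) :: pvPrefixAux 0 s
  let total := pre.getD n 0
  -- Source B's hand-written `while lo < hi` bisect_left loop is exactly
  -- PySem.List.bisectLeft (same loop, same mid and branch structure)
  (queries.foldl
    (fun (st : List Int × Int) q =>
      let shift := st.2 + q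
      let k := PySem.List.bisectLeft s (-shift)
      let neg := pre.getD k 0
      (st.1 ++ [(total - neg + ((n : Int) - (k : Int)) * shift) - (neg + (k : Int) * shift)], shift))
    ([], 0)).1

-- ===== PRECONDITION & SPEC =====
def Spec_playingWithNumbers (arr : List Int) (queries : List Int) (out : List Int) : Prop := out = playingWithNumbers_alt arr queries
instance (arr : List Int) (queries : List Int) (out : List Int) : Decidable (Spec_playingWithNumbers arr queries out) := by unfold Spec_playingWithNumbers; infer_instance

-- ===== CLAIM (what is proved, stated in full; the proofs are below) =====
def Claim_equal_playingWithNumbers : Prop := ∀ (arr : List Int) (queries : List Int), Dom_playingWithNumbers arr queries → Spec_playingWithNumbers arr queries (playingWithNumbers arr queries)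

-- ===== LEMMAS AND PROOFS =====

-- pre sums: (0 :: pvPrefixAux 0 s).getD k 0 = sum of the first k elements
theorem pvPrefixAux_getD (s : List Int) : ∀ (acc : Int) (k : Nat), k ≤ s.length →
    ((acc :: pvPrefixAux acc s).getD k 0) = acc + (s.take k).sum := by
  induction s with
  | nil => intro acc k hk; cases k with | zero => simp | succ k => simp at hk
  | cons x xs ih =>
    intro acc k hk
    cases k with
    | zero => simp
    | succ k =>
      have := ih (acc + x) k (by simpa using hk)
      simpa [pvPrefixAux, add_assoc] using this

theorem sum_map_abs_neg (l : List Int) (shift : Int) (h : ∀ x ∈ l, x < -shift) :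
    (l.map (fun x => |x + shift|)).sum = -(l.sum) - (l.length : Int) * shift := by
  induction l with
  | nil => simp
  | cons x xs ih =>
    have hx : x + shift < 0 := by have := h x (by simp); omega
    have hxs : ∀ y ∈ xs, y < -shift := fun y hy => h y (by simp [hy])
    simp [abs_of_neg hx, ih hxs]; ring

theorem sum_map_abs_nonneg (l : List Int) (shift : Int) (h : ∀ x ∈ l, -shift ≤ x) :
    (l.map (fun x => |x + shift|)).sum = l.sum + (l.length : Int) * shift := by
  induction l with
  | nil => simp
  | cons x xs ih =>
    have hx : 0 ≤ x + shift := by have := h x (by simp); omega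
    have hxs : ∀ y ∈ xs, -shift ≤ y := fun y hy => h y (by simp [hy])
    simp [abs_of_nonneg hx, ih hxs]; ring

-- per-query value: A's scan equals B's pre-sum/bisect formula
theorem pvKey (arr : List Int) (shift : Int) :
    (arr.map (fun x => |x + shift|)).sum =
      (let s := PySem.List.sorted arr (fun x => x) false
       let n := s.length
       let pre := (0 : Int) :: pvPrefixAux 0 s
       let total := pre.getD n 0
       let k := PySem.List.bisectLeft s (-shift)
       let neg := pre.getD k 0
       (total - neg + ((n : Int) - (k : Int)) * shift) - (neg + (k : Int) * shift)) := by
  set s := PySem.List.sorted arr (fun x => x) false with hs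
  have hperm : s.Perm arr := PySem.List.sorted_perm arr _ false
  have hpw : s.Pairwise (· ≤ ·) := by
    simpa using PySem.List.sorted_pairwise arr (fun x => x)
  obtain ⟨hk, hlt, hge⟩ := PySem.List.bisectLeft_spec s (-shift) hpw
  set k := PySem.List.bisectLeft s (-shift) with hkdef
  set n := s.length with hn
  -- sums over arr = sums over s
  have hmap : (arr.map (fun x => |x + shift|)).sum = (s.map (fun x => |x + shift|)).sum :=
    ((hperm.map (fun x => |x + shift|)).sum_eq).symm
  -- elements of the two halves
  have htake : ∀ x ∈ s.take k, x < -shift := by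
    intro x hx
    rw [List.mem_take_iff_getElem] at hx
    obtain ⟨i, hi, rfl⟩ := hx
    exact hlt i (lt_of_lt_of_le (lt_min_iff.mp hi).1 hk) (lt_min_iff.mp hi).1
  have hdrop : ∀ x ∈ s.drop k, -shift ≤ x := by
    intro x hx
    rw [List.mem_iff_getElem] at hx
    obtain ⟨i, hi, rfl⟩ := hx
    rw [List.getElem_drop]
    exact hge (k + i) (by simp at hi; omega) (Nat.le_add_right _ _)
  have hsplit : (s.map (fun x => |x + shift|)).sum
      = ((s.take k).map (fun x => |x + shift|)).sum + ((s.drop k).map (fun x => |x + shift|)).sum := by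
    conv_lhs => rw [← List.take_append_drop k s]
    rw [List.map_append, List.sum_append]
  have hlen_take : (s.take k).length = k := by simp; omega
  have hlen_drop : (s.drop k).length = n - k := by simp [hn]
  have hpren : ((0 : Int) :: pvPrefixAux 0 s).getD n 0 = s.sum := by
    have := pvPrefixAux_getD s 0 n (le_refl _)
    simpa [hn, List.take_length] using this
  have hprek : ((0 : Int) :: pvPrefixAux 0 s).getD k 0 = (s.take k).sum := by
    have := pvPrefixAux_getD s 0 k hk
    simpa using this
  have hsum : s.sum = (s.take k).sum + (s.drop k).sum := by
    conv_lhs => rw [← List.take_append_drop k s]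
    rw [List.sum_append]
  simp only []
  rw [hmap, hsplit, sum_map_abs_neg _ _ htake, sum_map_abs_nonneg _ _ hdrop,
    hpren, hprek, hlen_take, hlen_drop, hsum]
  have hcast : ((n - k : Nat) : Int) = (n : Int) - (k : Int) := by omega
  rw [hcast]; ring

theorem pvFoldCongr (F G : Int → Int) (h : ∀ sh, F sh = G sh) (qs : List Int) :
    ∀ (acc : List Int) (sh : Int),
      qs.foldl (fun (st : List Int × Int) q => (st.1 ++ [F (st.2 + q)], st.2 + q)) (acc, sh)
      = qs.foldl (fun (st : List Int × Int) q => (st.1 ++ [G (st.2 + q)], st.2 + q)) (acc, sh) := by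
  induction qs with
  | nil => intro acc sh; rfl
  | cons q qs ih => intro acc sh; rw [List.foldl_cons, List.foldl_cons]; rw [show F (sh + q) = G (sh + q) from h _]; exact ih (acc ++ [G (sh + q)]) (sh + q)

-- ===== VERDICT (by name: the statement is the Claim_ definition above) =====
theorem playingWithNumbers_spec : Claim_equal_playingWithNumbers := by
  intro arr queries _
  unfold Spec_playingWithNumbers playingWithNumbers playingWithNumbers_alt
  have := pvFoldCongr
    (fun sh => (arr.map (fun x => |x + sh|)).sum)
    (fun sh =>
      let s := PySem.List.sorted arr (fun x => x) false
      let n := s.length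
      let pre := (0 : Int) :: pvPrefixAux 0 s
      let total := pre.getD n 0
      let k := PySem.List.bisectLeft s (-sh)
      let neg := pre.getD k 0
      (total - neg + ((n : Int) - (k : Int)) * sh) - (neg + (k : Int) * sh))
    (fun sh => pvKey arr sh) queries [] 0
  exact congrArg Prod.fst this
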